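-- pv_equiv track=rewrite | github.com/inspirewind/SAGApipeline | fasta_fix/get_header.py | stat_by_len
-- ===== SOURCE A (Python) =====
-- def stat_by_len(stat_len_lis : list, header_len_lis : list) -> dict:
--     # init len_dict
--     len_dict = {}
--     for i in stat_len_lis:
--         len_dict[i] = 0
--
--     for stat_len in stat_len_lis:
--         for header_len in header_len_lis:
--             if header_len <= stat_len:
--                 len_dict[stat_len] += 1
--
--     return len_dict
-- ===== SOURCE B (Python) =====
-- def stat_by_len(stat_len_lis : list, header_len_lis : list) -> dict:
--     # tally each distinct stat length once, then do ONE header scan per distinct value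
--     mult = {}
--     for s in stat_len_lis:
--         mult[s] = mult.get(s, 0) + 1
--     return {s: m * sum(1 for h in header_len_lis if h <= s)
--             for s, m in mult.items()}
-- ===== Notes on version B (the rewrite author's own statement) =====
-- stated objective: alternative
-- what changed: B replaces A's per-occurrence nested increment loops (one full header scan per element of stat_len_lis) by a multiplicity counter over stat_len_lis plus a single header count per DISTINCT stat length, multiplied by the multiplicity.
import Mathlib
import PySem

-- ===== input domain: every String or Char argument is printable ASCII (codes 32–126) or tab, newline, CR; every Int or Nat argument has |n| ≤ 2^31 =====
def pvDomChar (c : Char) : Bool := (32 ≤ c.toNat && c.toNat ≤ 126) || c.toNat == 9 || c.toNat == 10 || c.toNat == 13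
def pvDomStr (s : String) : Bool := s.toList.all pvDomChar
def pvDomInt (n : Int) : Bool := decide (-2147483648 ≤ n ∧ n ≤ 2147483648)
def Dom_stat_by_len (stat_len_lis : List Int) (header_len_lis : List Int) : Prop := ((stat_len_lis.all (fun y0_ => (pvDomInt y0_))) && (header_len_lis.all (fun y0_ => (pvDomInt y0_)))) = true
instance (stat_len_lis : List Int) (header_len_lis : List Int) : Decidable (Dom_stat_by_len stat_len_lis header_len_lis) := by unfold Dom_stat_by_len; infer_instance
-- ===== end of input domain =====

-- B counts headers once per DISTINCT stat length and multiplies by that length's multiplicity,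
-- instead of A's full header scan per occurrence; same dict (first-occurrence key order) is proved.


-- ===== PORT A =====
-- 'len_dict[stat_len] += 1' always finds its key (inserted by the init loop), so
-- Dict.modify with default 0 is exact here (the default is never used).
def stat_by_len (stat_len_lis : List Int) (header_len_lis : List Int) : List (Int × Int) :=
  let d0 : PySem.Dict Int Int :=
    stat_len_lis.foldl (fun d i => d.insert i 0) PySem.Dict.empty
  let d1 :=
    stat_len_lis.foldl (fun d stat_len =>
      header_len_lis.foldl (fun d header_len =>
        if header_len ≤ stat_len then d.modify stat_len 0 (· + 1) else d) d) d0
  d1.items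

-- ===== PORT B =====
def stat_by_len_alt (stat_len_lis : List Int) (header_len_lis : List Int) : List (Int × Int) :=
  let mult : PySem.Dict Int Int :=
    stat_len_lis.foldl (fun d s => d.insert s (d.getD s 0 + 1)) PySem.Dict.empty
  (PySem.Dict.ofList (mult.items.map (fun p =>
      (p.1, p.2 * header_len_lis.foldl (fun acc h => if h ≤ p.1 then acc + 1 else acc) 0)))).items

-- ===== PRECONDITION & SPEC =====
def Spec_stat_by_len (stat_len_lis : List Int) (header_len_lis : List Int) (out : List (Int × Int)) : Prop := out = stat_by_len_alt stat_len_lis header_len_lis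
instance (stat_len_lis : List Int) (header_len_lis : List Int) (out : List (Int × Int)) : Decidable (Spec_stat_by_len stat_len_lis header_len_lis out) := by unfold Spec_stat_by_len; infer_instance

-- ===== CLAIM (what is proved, stated in full; the proofs are below) =====
def Claim_equal_stat_by_len : Prop := ∀ (stat_len_lis : List Int) (header_len_lis : List Int), Dom_stat_by_len stat_len_lis header_len_lis → Spec_stat_by_len stat_len_lis header_len_lis (stat_by_len stat_len_lis header_len_lis)

-- ===== LEMMAS AND PROOFS =====

-- A's inner loop: the value at v grows by (count of headers ≤ s) exactly when v = s.
theorem pv_innerA_getD (hdr : List Int) (s v : Int) (d : PySem.Dict Int Int) :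
    (hdr.foldl (fun d h => if h ≤ s then d.modify s 0 (· + 1) else d) d).getD v 0
      = d.getD v 0 + if v = s then (hdr.countP (fun h => decide (h ≤ s)) : Int) else 0 := by
  induction hdr generalizing d with
  | nil => simp
  | cons h t ih =>
    simp only [List.foldl_cons, List.countP_cons]
    by_cases hh : h ≤ s
    · rw [if_pos hh, ih, PySem.Dict.getD_modify]
      by_cases hv : v = s <;> simp [hv, hh] <;> ring
    · rw [if_neg hh, ih]
      simp [hh]

-- A's inner loop does not change the key list when the key is already present.
theorem pv_innerA_keys (hdr : List Int) (s : Int) (d : PySem.Dict Int Int)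
    (hc : d.contains s = true) :
    (hdr.foldl (fun d h => if h ≤ s then d.modify s 0 (· + 1) else d) d).keys = d.keys := by
  induction hdr generalizing d with
  | nil => rfl
  | cons h t ih =>
    simp only [List.foldl_cons]
    by_cases hh : h ≤ s
    · rw [if_pos hh]
      have hk : (d.modify s 0 (· + 1)).keys = d.keys := by
        rw [PySem.Dict.keys_modify, PySem.Dict.keys_insert_of_contains d _ hc]
      have hc' : (d.modify s 0 (· + 1)).contains s = true := by
        rw [PySem.Dict.contains_iff_mem_keys, hk, ← PySem.Dict.contains_iff_mem_keys]; exact hc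
      rw [ih _ hc', hk]
    · rw [if_neg hh]; exact ih d hc

-- A's outer loop: the value at v grows by (multiplicity of v) * (count of headers ≤ v).
theorem pv_outerA_getD (stat hdr : List Int) (v : Int) (d : PySem.Dict Int Int) :
    (stat.foldl (fun d s =>
        hdr.foldl (fun d h => if h ≤ s then d.modify s 0 (· + 1) else d) d) d).getD v 0
      = d.getD v 0 + (stat.count v : Int) * (hdr.countP (fun h => decide (h ≤ v)) : Int) := by
  induction stat generalizing d with
  | nil => simp
  | cons s t ih =>
    simp only [List.foldl_cons, List.count_cons]
    rw [ih, pv_innerA_getD]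
    by_cases hv : v = s
    · subst hv; simp; ring
    · have : ¬ (s = v) := fun h => hv h.symm
      simp [hv, this]

-- A's outer loop does not change the key list when every stat length is already a key.
theorem pv_outerA_keys (stat hdr : List Int) (d : PySem.Dict Int Int)
    (h : ∀ s ∈ stat, s ∈ d.keys) :
    (stat.foldl (fun d s =>
        hdr.foldl (fun d h => if h ≤ s then d.modify s 0 (· + 1) else d) d) d).keys = d.keys := by
  induction stat generalizing d with
  | nil => rfl
  | cons s t ih =>
    simp only [List.foldl_cons]
    have hc : d.contains s = true := by
      rw [PySem.Dict.contains_iff_mem_keys]; exact h s (by simp)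
    have hk := pv_innerA_keys hdr s d hc
    rw [ih _ (fun x hx => by rw [hk]; exact h x (by simp [hx])), hk]

-- A's init loop: keys are the distinct stat lengths in first-occurrence order.
theorem pv_d0_keys (stat : List Int) :
    (stat.foldl (fun d i => d.insert i 0) (PySem.Dict.empty : PySem.Dict Int Int)).keys
      = PySem.Set.ofList stat := by
  rw [PySem.Dict.keys_foldl_insert stat (fun _ _ => (0 : Int))]
  rw [PySem.Dict.keys_empty]
  rfl

-- A's init loop: every lookup with default 0 yields 0.
theorem pv_d0_getD (stat : List Int) (v : Int) (d : PySem.Dict Int Int) (h : d.getD v 0 = 0) :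
    (stat.foldl (fun d i => d.insert i 0) d).getD v 0 = 0 := by
  induction stat generalizing d with
  | nil => exact h
  | cons i t ih =>
    simp only [List.foldl_cons]
    exact ih _ (by rw [PySem.Dict.getD_insert]; split_ifs <;> simp [h])

-- B in closed form: the distinct stat lengths, each paired with multiplicity * header count.
theorem pv_alt_eq (stat hdr : List Int) :
    stat_by_len_alt stat hdr
      = (PySem.Set.ofList stat).map (fun s =>
          (s, (stat.count s : Int) * (hdr.countP (fun h => decide (h ≤ s)) : Int))) := by
  unfold stat_by_len_alt
  simp only [PySem.Dict.foldl_insert_getD_add_one_eq_counter, PySem.Dict.items_counter,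
    List.map_map]
  set L := (PySem.Set.ofList stat).map
      ((fun p : Int × Int => (p.1, p.2 * hdr.foldl (fun acc h => if h ≤ p.1 then acc + 1 else acc) 0))
        ∘ (fun k => (k, (stat.count k : Int)))) with hL
  have hfst : L.map (fun p => p.1) = PySem.Set.ofList stat := by
    rw [hL, List.map_map]; simp [Function.comp_def]
  have hitems : (PySem.Dict.ofList L : PySem.Dict Int Int).items = L := by
    show ((PySem.Dict.empty : PySem.Dict Int Int).update L).items = L
    unfold PySem.Dict.update
    simpa using PySem.Dict.items_foldl_insert_fresh L (fun p : Int × Int => p.1) (fun p => p.2)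
      (PySem.Dict.empty : PySem.Dict Int Int)
      (fun a _ => PySem.Dict.contains_empty a.1)
      (by rw [hfst]; exact PySem.Set.nodup_ofList stat)
  rw [hitems, hL]
  refine List.map_congr_left (fun s _ => ?_)
  have hfold : hdr.foldl (fun acc h => if h ≤ s then acc + 1 else acc) 0
      = (hdr.countP (fun h => decide (h ≤ s)) : Int) := by
    simpa using PySem.List.foldl_ite_add_one (fun h => h ≤ s) hdr 0
  simp [hfold]

-- ===== VERDICT (by name: the statement is the Claim_ definition above) =====
theorem stat_by_len_spec : Claim_equal_stat_by_len := by
  intro stat hdr _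
  unfold Spec_stat_by_len
  rw [pv_alt_eq]
  unfold stat_by_len
  set d0 : PySem.Dict Int Int := stat.foldl (fun d i => d.insert i 0) PySem.Dict.empty with hd0
  set dA := stat.foldl (fun d s =>
      hdr.foldl (fun d h => if h ≤ s then d.modify s 0 (· + 1) else d) d) d0 with hdA
  have hkeys : dA.keys = PySem.Set.ofList stat := by
    rw [hdA, pv_outerA_keys stat hdr d0 (fun s hs => by
      rw [hd0, pv_d0_keys]; exact (PySem.Set.mem_ofList stat s).mpr hs)]
    rw [hd0, pv_d0_keys]
  have hnd : dA.keys.Nodup := by rw [hkeys]; exact PySem.Set.nodup_ofList stat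
  rw [PySem.Dict.items_eq_map_keys dA hnd 0, hkeys]
  refine List.map_congr_left (fun s _ => ?_)
  have : dA.getD s 0 = (stat.count s : Int) * (hdr.countP (fun h => decide (h ≤ s)) : Int) := by
    rw [hdA, pv_outerA_getD, hd0, pv_d0_getD stat s PySem.Dict.empty (by simp [PySem.Dict.getD_empty])]
    ring
  rw [this]
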